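-- pv_equiv track=rewrite | github.com/sskibin22/AI_Final_Project | NaiveBayes_Digit_Rec(Convolution).py | convert_image_to_bin
-- ===== SOURCE A (Python) =====
-- def convert_image_to_bin(lines, file_pix_H, img_pix_H):
--     new_image_list = []
--     end_incr = img_pix_H
--     for x in range(0, file_pix_H, img_pix_H):
--         new_lines_list = []
--         for line in lines[x:end_incr]:
--             new_line_list = []
--             for char in line[:28]:
--                 if char == '#' or char == '+':
--                     new_line_list.append(1)
--                 else:
--                     new_line_list.append(0)
--
--             new_lines_list.append(new_line_list)
--
--         new_image_list.append(new_lines_list)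
--         end_incr += img_pix_H
--
--     return new_image_list
-- ===== SOURCE B (Python) =====
-- def convert_image_to_bin(lines, file_pix_H, img_pix_H):
--     n_blocks = len(range(0, file_pix_H, img_pix_H))
--     blocks = [[] for _ in range(n_blocks)]
--     for idx, line in enumerate(lines):
--         j = idx // img_pix_H
--         if 0 <= j < n_blocks:
--             blocks[j].append([1 if ch == '#' or ch == '+' else 0 for ch in line[:28]])
--     return blocks
-- ===== Notes on version B (the rewrite author's own statement) =====
-- stated objective: alternative
-- what changed: Replaces A's per-block slicing (outer loop over block starts, inner loop slicing lines[x:end_incr]) with a single pass over the lines that distributes each converted row into a pre-allocated bucket chosen by integer division idx // img_pix_H.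
-- outside the precondition, e.g. on convert_image_to_bin(['#'], -2, -1): A returns [[], []], B returns [[[1]], []]
import Mathlib
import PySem

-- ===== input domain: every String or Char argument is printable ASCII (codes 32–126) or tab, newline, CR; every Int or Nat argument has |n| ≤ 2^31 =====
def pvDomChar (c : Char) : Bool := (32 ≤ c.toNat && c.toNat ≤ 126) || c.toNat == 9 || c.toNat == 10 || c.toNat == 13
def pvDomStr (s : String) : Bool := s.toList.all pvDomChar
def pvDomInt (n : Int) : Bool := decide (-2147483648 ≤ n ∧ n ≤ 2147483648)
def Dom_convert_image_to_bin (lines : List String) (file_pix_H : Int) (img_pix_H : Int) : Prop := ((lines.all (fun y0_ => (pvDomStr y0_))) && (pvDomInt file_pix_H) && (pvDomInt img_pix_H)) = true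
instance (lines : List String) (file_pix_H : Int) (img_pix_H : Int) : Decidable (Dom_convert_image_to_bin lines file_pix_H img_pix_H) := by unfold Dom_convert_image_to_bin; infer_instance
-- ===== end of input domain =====

-- ===== PORT A =====
-- B replaces A's per-block slicing by a single pass that distributes each converted row into a bucket chosen by idx // img_pix_H; same cost, different traversal.
def convert_image_to_bin (lines : List String) (file_pix_H : Int) (img_pix_H : Int) : List (List (List Int)) :=
  ((PySem.List.pyRange 0 file_pix_H img_pix_H).foldl
    (fun (st : List (List (List Int)) × Int) x =>
      (st.1 ++ [(PySem.List.slice lines (some x) (some st.2)).map (fun line =>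
          (PySem.List.slice line.toList none (some 28)).foldl
            (fun (new_line_list : List Int) c =>
              new_line_list ++ [if c = '#' ∨ c = '+' then (1 : Int) else 0]) [])],
       st.2 + img_pix_H))
    ([], img_pix_H)).1

-- ===== PORT B =====
def convert_image_to_bin_alt (lines : List String) (file_pix_H : Int) (img_pix_H : Int) : List (List (List Int)) :=
  let n_blocks : Nat := (PySem.List.pyRange 0 file_pix_H img_pix_H).length
  (PySem.List.enumerate lines 0).foldl
    (fun (blocks : List (List (List Int))) p =>
      let j := PySem.Int.floordiv p.1 img_pix_H
      if 0 ≤ j ∧ j < (n_blocks : Int) then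
        blocks.modify j.toNat (fun b => b ++ [(PySem.List.slice p.2.toList none (some 28)).map
          (fun ch => if ch = '#' ∨ ch = '+' then (1 : Int) else 0)])
      else blocks)
    (List.replicate n_blocks [])

-- ===== PRECONDITION & SPEC =====
-- Pre_ excludes img_pix_H = 0, where both programs raise ValueError (range step 0), and the degenerate corner
-- img_pix_H < 0 ∧ file_pix_H < 0, where a negative block count meets a negative file height and A's slice
-- bounds go negative, so A's and B's (both returned) groupings are equally unspecified and differ.
def Pre_convert_image_to_bin (lines : List String) (file_pix_H : Int) (img_pix_H : Int) : Prop :=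
  0 < img_pix_H ∨ (img_pix_H < 0 ∧ 0 ≤ file_pix_H)
instance (lines : List String) (file_pix_H : Int) (img_pix_H : Int) : Decidable (Pre_convert_image_to_bin lines file_pix_H img_pix_H) := by unfold Pre_convert_image_to_bin; infer_instance
def pvWitness_convert_image_to_bin : List String × Int × Int := (["#+.#", "....", "++##"], 4, 2)
def Spec_convert_image_to_bin (lines : List String) (file_pix_H : Int) (img_pix_H : Int) (out : List (List (List Int))) : Prop := out = convert_image_to_bin_alt lines file_pix_H img_pix_H
instance (lines : List String) (file_pix_H : Int) (img_pix_H : Int) (out : List (List (List Int))) : Decidable (Spec_convert_image_to_bin lines file_pix_H img_pix_H out) := by unfold Spec_convert_image_to_bin; infer_instance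

-- ===== CLAIM (what is proved, stated in full; the proofs are below) =====
def Claim_equal_convert_image_to_bin : Prop := ∀ (lines : List String) (file_pix_H : Int) (img_pix_H : Int), Dom_convert_image_to_bin lines file_pix_H img_pix_H → Pre_convert_image_to_bin lines file_pix_H img_pix_H → Spec_convert_image_to_bin lines file_pix_H img_pix_H (convert_image_to_bin lines file_pix_H img_pix_H)

-- ===== LEMMAS AND PROOFS =====

-- A's fold over an arithmetic progression, with the running end counter starting at
-- a + s, is the map pairing each x with the end bound x + s.
theorem pv_fold_prog {α : Type} (g : Int → Int → α) (s : Int) (n : Nat) (a : Int) (acc : List α) :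
    (((List.range n).map (fun k : Nat => a + s * (k : Int))).foldl
        (fun (st : List α × Int) x => (st.1 ++ [g x st.2], st.2 + s)) (acc, a + s)).1
      = acc ++ ((List.range n).map (fun k : Nat => a + s * (k : Int))).map (fun x => g x (x + s)) := by
  induction n generalizing a acc with
  | zero => simp
  | succ n ih =>
      rw [List.range_succ_eq_map]
      have hf : ((fun k : Nat => a + s * (k : Int)) ∘ Nat.succ)
          = (fun k : Nat => (a + s) + s * (k : Int)) := by
        funext k; simp only [Function.comp]; push_cast; ring
      simp only [List.map_cons, List.map_map, hf, List.foldl_cons, Nat.cast_zero, mul_zero,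
        add_zero]
      rw [show a + s + s = (a + s) + s from rfl, ih (a + s) (acc ++ [g a (a + s)])]
      simp

-- appending y past a full segment / inside the open segment / before a later segment
theorem pv_seg_lt {α : Type} (ps : List α) (y : α) (a b : Nat) (h : a + b ≤ ps.length) :
    ((ps ++ [y]).drop a).take b = (ps.drop a).take b := by
  rw [List.drop_append_of_le_length (by omega),
    List.take_append_of_le_length (by rw [List.length_drop]; omega)]

theorem pv_seg_eq {α : Type} (ps : List α) (y : α) (a b : Nat)
    (h1 : a ≤ ps.length) (h2 : ps.length < a + b) :
    ((ps ++ [y]).drop a).take b = (ps.drop a).take b ++ [y] := by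
  rw [List.drop_append_of_le_length h1,
    List.take_of_length_le (by simp [List.length_drop]; omega),
    List.take_of_length_le (by rw [List.length_drop]; omega)]

theorem pv_seg_gt {α : Type} (ps : List α) (y : α) (a b : Nat) (h : ps.length < a) :
    ((ps ++ [y]).drop a).take b = (ps.drop a).take b := by
  rw [List.drop_eq_nil_of_le (by simp; omega), List.drop_eq_nil_of_le (by omega)]

-- one distribution step: appending row y at global index ps.length updates exactly bucket ps.length / t
theorem pv_step (row : String → List Int) (t n : Nat) (ht : 0 < t) (ps : List String) (y : String) :
    (if ps.length / t < n then
        ((List.range n).map (fun k => ((ps.drop (t*k)).take t).map row)).modify (ps.length / t)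
          (fun b => b ++ [row y])
      else (List.range n).map (fun k => ((ps.drop (t*k)).take t).map row))
    = (List.range n).map (fun k => (((ps ++ [y]).drop (t*k)).take t).map row) := by
  have hdm := Nat.div_add_mod ps.length t
  have hml := Nat.mod_lt ps.length ht
  have hle : t * (ps.length / t) ≤ ps.length := by omega
  have hlt : ps.length < t * (ps.length / t) + t := by omega
  have hcase : ∀ k, k ≠ ps.length / t →
      (((ps ++ [y]).drop (t*k)).take t) = ((ps.drop (t*k)).take t) := by
    intro k hk
    rcases Nat.lt_or_ge k (ps.length / t) with hklt | hkge
    · refine pv_seg_lt ps y _ _ ?_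
      have := Nat.mul_le_mul_left t (show k + 1 ≤ ps.length / t by omega)
      simp only [Nat.mul_succ] at this; omega
    · have hkgt : ps.length / t < k := by omega
      refine pv_seg_gt ps y _ _ ?_
      have := Nat.mul_le_mul_left t (show ps.length / t + 1 ≤ k by omega)
      simp only [Nat.mul_succ] at this; omega
  split_ifs with hjn
  · apply List.ext_getElem
    · simp [List.length_modify]
    · intro k h1 h2
      rw [List.getElem_modify]
      simp only [List.getElem_map, List.getElem_range]
      have hk : k < n := by simpa [List.length_modify] using h1
      by_cases hkj : ps.length / t = k
      · subst hkj
        rw [if_pos rfl, pv_seg_eq ps y _ _ hle hlt, List.map_append]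
        simp
      · rw [if_neg hkj, hcase k (fun h => hkj h.symm)]
  · refine List.map_congr_left ?_
    intro k hkmem
    rw [hcase k ?_]
    have := List.mem_range.mp hkmem
    omega

-- the whole single pass: distributing the enumerated suffix ys after prefix ps fills the buckets
theorem pv_dist (row : String → List Int) (t n : Nat) (ht : 0 < t) :
    ∀ (ys ps : List String),
    (PySem.List.enumerate ys (ps.length : Int)).foldl
      (fun (blocks : List (List (List Int))) p =>
        if 0 ≤ PySem.Int.floordiv p.1 (t : Int) ∧ PySem.Int.floordiv p.1 (t : Int) < (n : Int) then
          blocks.modify (PySem.Int.floordiv p.1 (t : Int)).toNat (fun b => b ++ [row p.2])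
        else blocks)
      ((List.range n).map (fun k => ((ps.drop (t*k)).take t).map row))
    = (List.range n).map (fun k => (((ps ++ ys).drop (t*k)).take t).map row) := by
  intro ys
  induction ys with
  | nil => intro ps; simp [PySem.List.enumerate_nil]
  | cons y ys ih =>
      intro ps
      rw [PySem.List.enumerate_cons, List.foldl_cons]
      have hfd : PySem.Int.floordiv (ps.length : Int) (t : Int) = ((ps.length / t : Nat) : Int) :=
        PySem.Int.floordiv_natCast _ _
      have hcond : (0 ≤ PySem.Int.floordiv (ps.length : Int) (t : Int) ∧
          PySem.Int.floordiv (ps.length : Int) (t : Int) < (n : Int)) ↔ ps.length / t < n := by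
        rw [hfd]; constructor
        · intro h; exact_mod_cast h.2
        · intro h; exact ⟨by positivity, by exact_mod_cast h⟩
      have hstep := pv_step row t n ht ps y
      have hmid : (if 0 ≤ PySem.Int.floordiv (ps.length : Int) (t : Int) ∧
            PySem.Int.floordiv (ps.length : Int) (t : Int) < (n : Int) then
          ((List.range n).map (fun k => ((ps.drop (t*k)).take t).map row)).modify
            (PySem.Int.floordiv (ps.length : Int) (t : Int)).toNat (fun b => b ++ [row y])
        else (List.range n).map (fun k => ((ps.drop (t*k)).take t).map row))
          = (List.range n).map (fun k => (((ps ++ [y]).drop (t*k)).take t).map row) := by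
        by_cases h : ps.length / t < n
        · rw [if_pos (hcond.mpr h)]
          rw [← hstep, if_pos h, hfd, Int.toNat_natCast]
        · rw [if_neg (fun hc => h (hcond.mp hc))]
          rw [← hstep, if_neg h]
      rw [hmid]
      have hlen : ((ps.length : Int) + 1) = ((ps ++ [y]).length : Int) := by
        simp
      rw [hlen, ih (ps ++ [y])]
      simp

-- ===== VERDICT (by name: the statement is the Claim_ definition above) =====
theorem convert_image_to_bin_spec : Claim_equal_convert_image_to_bin := by
  intro lines f i _ hpre
  rcases (show 0 < i ∨ (i < 0 ∧ 0 ≤ f) from hpre) with hpos | hneg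
  case inr =>
    unfold Spec_convert_image_to_bin convert_image_to_bin convert_image_to_bin_alt
    have hfr : PySem.List.pyRange 0 f i = [] := by
      rw [PySem.List.pyRange_of_neg 0 f hneg.1, if_neg (by omega)]
      simp
    rw [hfr]
    have hfalse : ∀ j : Int, (0 ≤ j ∧ j < 0) ↔ False := fun j => iff_false_intro (by omega)
    simp [hfalse, List.foldl_fixed]
  case inl =>
    obtain ⟨t, hit, ht⟩ : ∃ t : Nat, i = (t : Int) ∧ 0 < t :=
      ⟨i.toNat, (Int.toNat_of_nonneg hpos.le).symm, by omega⟩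
    unfold Spec_convert_image_to_bin convert_image_to_bin convert_image_to_bin_alt
    rw [PySem.List.pyRange_of_pos 0 f hpos]
    set n : Nat := (if (0:Int) < f then ((f - 0 + i - 1) / i).toNat else 0) with hn
    -- A's side: running-counter fold → map over the block starts
    have hA := pv_fold_prog
      (fun x e => (PySem.List.slice lines (some x) (some e)).map (fun line =>
        (PySem.List.slice line.toList none (some 28)).foldl
          (fun (new_line_list : List Int) c =>
            new_line_list ++ [if c = '#' ∨ c = '+' then (1 : Int) else 0]) []))
      i n 0 []
    simp only [zero_add, List.nil_append] at hA
    -- B's side: the single pass fills the buckets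
    have hB := pv_dist
      (fun line => (PySem.List.slice line.toList none (some 28)).map
        (fun ch => if ch = '#' ∨ ch = '+' then (1 : Int) else 0))
      t n ht lines []
    simp only [List.length_nil, Nat.cast_zero, List.nil_append, List.drop_nil, List.take_nil,
      List.map_nil, List.map_const', List.length_range] at hB
    rw [← hit] at hB
    simp only [zero_add, List.length_map, List.length_range]
    rw [hA, hB]
    -- pointwise over the blocks
    rw [List.map_map]
    refine List.map_congr_left ?_
    intro k _
    simp only [Function.comp]
    have hx : i * (k : Int) = ((t * k : Nat) : Int) := by rw [hit]; push_cast; ring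
    have hx2 : i * (k : Int) + i = ((t * k : Nat) : Int) + ((t : Nat) : Int) := by
      rw [hit]; push_cast; ring
    rw [hx2, hx, PySem.List.slice_natCast_add]
    refine List.map_congr_left ?_
    intro line _
    rw [PySem.List.foldl_append_singleton_eq_map, List.nil_append]
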